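-- pv_equiv track=rewrite | github.com/soxballs/gcpwn | gcpwn/modules/opengraph/utilities/helpers/iam_bindings_shared_helpers.py | _permission_service
-- ===== SOURCE A (Python) =====
-- _PERMISSION_SERVICE_PREFIX_MAP: tuple[tuple[str, str], ...] = (
--     ("resourcemanager.", "cloudresourcemanager.googleapis.com"),
--     ("compute.", "compute.googleapis.com"),
--     ("storage.", "storage.googleapis.com"),
--     ("cloudfunctions.", "cloudfunctions.googleapis.com"),
--     ("iam.", "iam.googleapis.com"),
--     ("secretmanager.", "secretmanager.googleapis.com"),
--     ("cloudkms.", "cloudkms.googleapis.com"),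
--     ("run.", "run.googleapis.com"),
--     ("artifactregistry.", "artifactregistry.googleapis.com"),
--     ("pubsub.", "pubsub.googleapis.com"),
--     ("servicedirectory.", "servicedirectory.googleapis.com"),
--     ("spanner.", "spanner.googleapis.com"),
--     ("cloudtasks.", "cloudtasks.googleapis.com"),
-- )
--
-- def _permission_service(permission: str) -> str:
--     token = str(permission or "").strip()
--     if not token:
--         return ""
--     for prefix, service in _PERMISSION_SERVICE_PREFIX_MAP:
--         if token.startswith(prefix):
--             return service
--     return ""
-- ===== SOURCE B (Python) =====
-- _KNOWN_SEGMENTS = frozenset({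
--     "resourcemanager", "compute", "storage", "cloudfunctions", "iam",
--     "secretmanager", "cloudkms", "run", "artifactregistry", "pubsub",
--     "servicedirectory", "spanner", "cloudtasks",
-- })
--
--
-- def _permission_service(permission: str) -> str:
--     token = str(permission or "").strip()
--     dot = token.find(".")
--     if dot < 0:
--         return ""
--     key = token[:dot]
--     if key not in _KNOWN_SEGMENTS:
--         return ""
--     if key == "resourcemanager":
--         key = "cloud" + key
--     return key + ".googleapis.com"
-- ===== Notes on version B (the rewrite author's own statement) =====
-- stated objective: alternative
-- what changed: Instead of scanning 13 (prefix, service) pairs, B takes the segment before the first dot, tests membership in a set of known segments, and derives the service name by appending the common googleapis domain suffix (with a special prefix for the one irregular segment), so the service strings are computed rather than stored.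
import Mathlib
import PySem

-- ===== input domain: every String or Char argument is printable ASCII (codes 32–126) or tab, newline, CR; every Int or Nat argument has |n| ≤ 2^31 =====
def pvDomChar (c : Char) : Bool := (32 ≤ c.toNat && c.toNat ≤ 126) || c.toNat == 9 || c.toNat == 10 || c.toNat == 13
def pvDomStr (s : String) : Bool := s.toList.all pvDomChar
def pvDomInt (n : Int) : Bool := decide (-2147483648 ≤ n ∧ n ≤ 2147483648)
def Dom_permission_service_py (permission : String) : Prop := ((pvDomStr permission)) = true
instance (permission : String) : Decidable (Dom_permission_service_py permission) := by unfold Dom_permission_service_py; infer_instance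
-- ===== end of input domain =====

-- B replaces A's linear prefix scan by taking the segment before the first dot, testing it against a set of known segments, and deriving the service name by appending ".googleapis.com" (alternative; same behaviour).


-- ===== PORT A =====
def pvPrefixMap : List (String × String) :=
  [("resourcemanager.", "cloudresourcemanager.googleapis.com"),
   ("compute.", "compute.googleapis.com"),
   ("storage.", "storage.googleapis.com"),
   ("cloudfunctions.", "cloudfunctions.googleapis.com"),
   ("iam.", "iam.googleapis.com"),
   ("secretmanager.", "secretmanager.googleapis.com"),
   ("cloudkms.", "cloudkms.googleapis.com"),
   ("run.", "run.googleapis.com"),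
   ("artifactregistry.", "artifactregistry.googleapis.com"),
   ("pubsub.", "pubsub.googleapis.com"),
   ("servicedirectory.", "servicedirectory.googleapis.com"),
   ("spanner.", "spanner.googleapis.com"),
   ("cloudtasks.", "cloudtasks.googleapis.com")]

def pvScanA : List (String × String) → String → String
  | [], _ => ""
  | (prefix_, service) :: rest, token =>
      if PySem.Str.startswith token prefix_ then service else pvScanA rest token

def permission_service_py (permission : String) : String :=
  let token := PySem.Str.strip (if permission == "" then "" else permission)
  if PySem.Str.len token = 0 then "" else pvScanA pvPrefixMap token

-- ===== PORT B =====
def pvKnownSegments : PySem.Set String :=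
  PySem.Set.ofList
    ["resourcemanager", "compute", "storage", "cloudfunctions", "iam",
     "secretmanager", "cloudkms", "run", "artifactregistry", "pubsub",
     "servicedirectory", "spanner", "cloudtasks"]

def permission_service_py_alt (permission : String) : String :=
  let token := PySem.Str.strip (if permission == "" then "" else permission)
  let dot := PySem.Str.find token "."
  if dot < 0 then ""
  else
    let key := PySem.Str.slice token none (some dot)
    if !(PySem.Set.contains pvKnownSegments key) then ""
    else
      let key2 := if key == "resourcemanager" then "cloud" ++ key else key
      key2 ++ ".googleapis.com"

-- ===== PRECONDITION & SPEC =====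
def Spec_permission_service_py (permission : String) (out : String) : Prop := out = permission_service_py_alt permission
instance (permission : String) (out : String) : Decidable (Spec_permission_service_py permission out) := by unfold Spec_permission_service_py; infer_instance

-- ===== CLAIM (what is proved, stated in full; the proofs are below) =====
def Claim_equal_permission_service_py : Prop := ∀ (permission : String), Dom_permission_service_py permission → Spec_permission_service_py permission (permission_service_py permission)

-- ===== LEMMAS AND PROOFS =====

-- first-occurrence characterisation: a dot-free segment followed by '.' prefixes tok
-- exactly when tok up to the first '.' equals that segment
lemma pv_startswith_eq_take (tok k : List Char)
    (hf : 0 ≤ PySem.Chars.find tok ['.']) (hk : '.' ∉ k) :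
    PySem.Chars.startswith tok (k ++ ['.']) =
      (List.take (PySem.Chars.find tok ['.']).toNat tok == k) := by
  set f := (PySem.Chars.find tok ['.']).toNat with hfdef
  obtain ⟨hpre, hmin⟩ := PySem.Chars.find_spec hf
  obtain ⟨rest, hr⟩ := hpre
  have htok : tok = List.take f tok ++ '.' :: rest := by
    conv_lhs => rw [← List.take_append_drop f tok]
    rw [← hr]; rfl
  rw [Bool.eq_iff_iff, PySem.Chars.startswith_iff, beq_iff_eq]
  constructor
  · rintro ⟨t, ht⟩
    have htok2 : tok = k ++ '.' :: t := by rw [← ht]; simp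
    have hle : f ≤ k.length := by
      by_contra h
      exact hmin k.length (by omega) ⟨t, by rw [htok2]; simp⟩
    have hge : ¬ f < k.length := by
      intro h
      have h1 : tok[f]? = some '.' := by
        rw [← List.head?_drop, ← hr]; rfl
      have h2 : tok[f]? = k[f]? := by
        rw [htok2]; exact List.getElem?_append_left h
      have h3 : k[f]? = some '.' := by rw [← h2, h1]
      exact hk (List.mem_of_getElem? h3)
    have : f = k.length := by omega
    rw [htok2, this, List.take_left]
  · intro h
    exact ⟨rest, by rw [htok, h]; simp⟩

lemma pv_body_eq (token : String) :
    (if PySem.Str.len token = 0 then "" else pvScanA pvPrefixMap token) =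
    (if PySem.Str.find token "." < 0 then ""
     else
       let key := PySem.Str.slice token none (some (PySem.Str.find token "."))
       if !(PySem.Set.contains pvKnownSegments key) then ""
       else
         let key2 := if key == "resourcemanager" then "cloud" ++ key else key
         key2 ++ ".googleapis.com") := by
  have hF : PySem.Str.find token "." = PySem.Chars.find token.toList ['.'] :=
    PySem.Str.find_eq token "."
  by_cases hf : PySem.Str.find token "." < 0
  · -- no dot in token: both sides ""
    have hnin : ¬ (['.'] <:+: token.toList) := by
      rw [← PySem.Chars.find_eq_neg_one_iff, ← hF]
      have := PySem.Chars.neg_one_le_find token.toList ['.']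
      rw [← hF] at this; omega
    have key : ∀ p : String, ('.' : Char) ∈ p.toList → PySem.Str.startswith token p = false := by
      intro p hp
      rw [PySem.Str.startswith_eq]
      by_contra h
      have h' : p.toList <+: token.toList :=
        (PySem.Chars.startswith_iff _ _).mp (by simpa using h)
      exact hnin ((List.singleton_infix_iff '.' _).mpr (h'.subset hp))
    rw [if_pos hf]
    simp only [pvScanA, pvPrefixMap,
      key "resourcemanager." (by decide), key "compute." (by decide),
      key "storage." (by decide), key "cloudfunctions." (by decide),
      key "iam." (by decide), key "secretmanager." (by decide),
      key "cloudkms." (by decide), key "run." (by decide),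
      key "artifactregistry." (by decide), key "pubsub." (by decide),
      key "servicedirectory." (by decide), key "spanner." (by decide),
      key "cloudtasks." (by decide), Bool.false_eq_true, if_false]
    split <;> rfl
  · -- token has a dot
    have hf' : 0 ≤ PySem.Chars.find token.toList ['.'] := by rw [← hF]; omega
    have hne : ¬ PySem.Str.len token = 0 := by
      intro h
      rw [PySem.Str.len_eq] at h
      have hnil : token.toList = [] := by
        cases htl : token.toList
        · rfl
        · rw [htl] at h; simp at h; omega
      have : PySem.Chars.find token.toList ['.'] = -1 := by
        rw [PySem.Chars.find_eq_neg_one_iff, hnil]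
        simp
      omega
    rw [if_neg hne, if_neg hf]
    have hslice : (PySem.Str.slice token none (some (PySem.Str.find token "."))).toList =
        List.take (PySem.Chars.find token.toList ['.']).toNat token.toList := by
      rw [PySem.Str.toList_slice]
      show PySem.List.slice token.toList none (some (PySem.Str.find token ".")) = _
      rw [hF, PySem.List.slice_to _ hf']
    have hs : ∀ (kd k : String), kd.toList = k.toList ++ ['.'] → ('.':Char) ∉ k.toList →
        PySem.Str.startswith token kd =
          (k == PySem.Str.slice token none (some (PySem.Str.find token "."))) := by
      intro kd k hkd hk
      rw [PySem.Str.startswith_eq]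
      have : kd.toList = k.toList ++ ['.'] := hkd
      rw [this, pv_startswith_eq_take _ _ hf' hk]
      rw [Bool.eq_iff_iff, beq_iff_eq, beq_iff_eq]
      constructor
      · intro he; exact (String.toList_inj.mp (by rw [hslice, he])).symm
      · intro hk2; rw [hk2]; exact hslice.symm
    simp only [pvScanA, pvPrefixMap,
      hs "resourcemanager." "resourcemanager" (by decide) (by decide),
      hs "compute." "compute" (by decide) (by decide),
      hs "storage." "storage" (by decide) (by decide),
      hs "cloudfunctions." "cloudfunctions" (by decide) (by decide),
      hs "iam." "iam" (by decide) (by decide),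
      hs "secretmanager." "secretmanager" (by decide) (by decide),
      hs "cloudkms." "cloudkms" (by decide) (by decide),
      hs "run." "run" (by decide) (by decide),
      hs "artifactregistry." "artifactregistry" (by decide) (by decide),
      hs "pubsub." "pubsub" (by decide) (by decide),
      hs "servicedirectory." "servicedirectory" (by decide) (by decide),
      hs "spanner." "spanner" (by decide) (by decide),
      hs "cloudtasks." "cloudtasks" (by decide) (by decide)]
    clear hslice hF hf hf' hne
    obtain ⟨s, hs0⟩ : ∃ s, PySem.Str.slice token none (some (PySem.Str.find token ".")) = s :=
      ⟨_, rfl⟩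
    rw [hs0]
    clear hs hs0
    by_cases h1 : ("resourcemanager" == s) = true
    · obtain rfl := beq_iff_eq.mp h1; decide
    rw [if_neg h1]
    by_cases h2 : ("compute" == s) = true
    · obtain rfl := beq_iff_eq.mp h2; decide
    rw [if_neg h2]
    by_cases h3 : ("storage" == s) = true
    · obtain rfl := beq_iff_eq.mp h3; decide
    rw [if_neg h3]
    by_cases h4 : ("cloudfunctions" == s) = true
    · obtain rfl := beq_iff_eq.mp h4; decide
    rw [if_neg h4]
    by_cases h5 : ("iam" == s) = true
    · obtain rfl := beq_iff_eq.mp h5; decide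
    rw [if_neg h5]
    by_cases h6 : ("secretmanager" == s) = true
    · obtain rfl := beq_iff_eq.mp h6; decide
    rw [if_neg h6]
    by_cases h7 : ("cloudkms" == s) = true
    · obtain rfl := beq_iff_eq.mp h7; decide
    rw [if_neg h7]
    by_cases h8 : ("run" == s) = true
    · obtain rfl := beq_iff_eq.mp h8; decide
    rw [if_neg h8]
    by_cases h9 : ("artifactregistry" == s) = true
    · obtain rfl := beq_iff_eq.mp h9; decide
    rw [if_neg h9]
    by_cases h10 : ("pubsub" == s) = true
    · obtain rfl := beq_iff_eq.mp h10; decide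
    rw [if_neg h10]
    by_cases h11 : ("servicedirectory" == s) = true
    · obtain rfl := beq_iff_eq.mp h11; decide
    rw [if_neg h11]
    by_cases h12 : ("spanner" == s) = true
    · obtain rfl := beq_iff_eq.mp h12; decide
    rw [if_neg h12]
    by_cases h13 : ("cloudtasks" == s) = true
    · obtain rfl := beq_iff_eq.mp h13; decide
    rw [if_neg h13]
    have hc : PySem.Set.contains pvKnownSegments s = false := by
      by_contra hcc
      rw [Bool.not_eq_false] at hcc
      have hm : s ∈ (pvKnownSegments : List String) := List.contains_iff_mem.mp hcc
      have hl : (pvKnownSegments : List String) =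
        ["resourcemanager", "compute", "storage", "cloudfunctions", "iam",
         "secretmanager", "cloudkms", "run", "artifactregistry", "pubsub",
         "servicedirectory", "spanner", "cloudtasks"] := by decide
      rw [hl] at hm
      simp only [List.mem_cons, List.not_mem_nil, or_false] at hm
      rcases hm with h|h|h|h|h|h|h|h|h|h|h|h|h
      · exact h1 (beq_iff_eq.mpr h.symm)
      · exact h2 (beq_iff_eq.mpr h.symm)
      · exact h3 (beq_iff_eq.mpr h.symm)
      · exact h4 (beq_iff_eq.mpr h.symm)
      · exact h5 (beq_iff_eq.mpr h.symm)
      · exact h6 (beq_iff_eq.mpr h.symm)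
      · exact h7 (beq_iff_eq.mpr h.symm)
      · exact h8 (beq_iff_eq.mpr h.symm)
      · exact h9 (beq_iff_eq.mpr h.symm)
      · exact h10 (beq_iff_eq.mpr h.symm)
      · exact h11 (beq_iff_eq.mpr h.symm)
      · exact h12 (beq_iff_eq.mpr h.symm)
      · exact h13 (beq_iff_eq.mpr h.symm)
    rw [hc]
    rfl

-- ===== VERDICT (by name: the statement is the Claim_ definition above) =====
theorem permission_service_py_spec : Claim_equal_permission_service_py := by
  intro permission _
  unfold Spec_permission_service_py permission_service_py permission_service_py_alt
  exact pv_body_eq _
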